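-- pv_equiv track=rewrite | github.com/ayoungkim1109/columbia_class | homework_three/ak4589_homework_3.py | question_30
-- ===== SOURCE A (Python) =====
-- def question_30(n):
--     F = []
--     for i in range (0, n):
--         listing = []
--         for x in range (1, i+1):
--             listing.append(x)
--         sum_listing = sum(listing)
--         twotothepower = 2 ** sum_listing
--         F.append(twotothepower)
--     return F
-- ===== SOURCE B (Python) =====
-- def question_30(n):
--     return [2 ** (i * (i + 1) // 2) for i in range(n)]
-- ===== Notes on version B (the rewrite author's own statement) =====
-- stated objective: simpler
-- what changed: Replaces the inner loop that builds and sums the list 1..i with the triangular-number closed form i*(i+1)//2, computing each power in a single comprehension; runtime is dominated by the big-integer powers, so no measured speedup.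
import Mathlib
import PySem

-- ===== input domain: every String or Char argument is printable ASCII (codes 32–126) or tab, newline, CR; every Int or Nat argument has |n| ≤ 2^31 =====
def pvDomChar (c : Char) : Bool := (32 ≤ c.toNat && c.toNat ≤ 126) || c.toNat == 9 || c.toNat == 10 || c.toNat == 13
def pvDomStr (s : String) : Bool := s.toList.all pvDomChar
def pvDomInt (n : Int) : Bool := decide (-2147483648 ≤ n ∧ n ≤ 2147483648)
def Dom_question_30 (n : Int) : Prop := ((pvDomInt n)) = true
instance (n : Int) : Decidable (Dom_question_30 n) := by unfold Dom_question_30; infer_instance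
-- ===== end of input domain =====

-- B replaces A's inner list-building loop and sum with the triangular-number closed form
-- i*(i+1)//2 in a single comprehension (objective: simpler).

-- ===== PORT A =====
-- 2 ** sum_listing : the exponent is a sum of nonnegative numbers, so .toNat is exact here.
def question_30 (n : Int) : List Int :=
  (PySem.List.pyRange 0 n 1).foldl
    (fun F i =>
      let listing := (PySem.List.pyRange 1 (i + 1) 1).foldl (fun l x => l ++ [x]) []
      let sum_listing := listing.sum
      let twotothepower := (2 : Int) ^ sum_listing.toNat
      F ++ [twotothepower]) []

-- ===== PORT B =====
def question_30_alt (n : Int) : List Int :=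
  (PySem.List.pyRange 0 n 1).map
    (fun i => (2 : Int) ^ (PySem.Int.floordiv (i * (i + 1)) 2).toNat)

-- ===== PRECONDITION & SPEC =====
def Spec_question_30 (n : Int) (out : List Int) : Prop := out = question_30_alt n
instance (n : Int) (out : List Int) : Decidable (Spec_question_30 n out) := by unfold Spec_question_30; infer_instance

-- ===== CLAIM (what is proved, stated in full; the proofs are below) =====
def Claim_equal_question_30 : Prop := ∀ (n : Int), Dom_question_30 n → Spec_question_30 n (question_30 n)

-- ===== LEMMAS AND PROOFS =====

-- sum of 1..i doubled is i*(i+1), for i = m a natural number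
theorem pv_sum_one_to (m : Nat) :
    (PySem.List.pyRange 1 ((m : Int) + 1) 1).sum * 2 = (m : Int) * ((m : Int) + 1) := by
  induction m with
  | zero => simp [PySem.List.pyRange_one_eq_nil]
  | succ k ih =>
      have h : PySem.List.pyRange 1 (((k : Int) + 1) + 1) 1
          = PySem.List.pyRange 1 ((k : Int) + 1) 1 ++ [(k : Int) + 1] :=
        PySem.List.pyRange_one_succ_right (by omega)
      push_cast
      rw [h, List.sum_append]
      push_cast at ih
      simp only [List.sum_cons, List.sum_nil]
      nlinarith [ih]

theorem pv_body (i : Int) (hi : 0 ≤ i) :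
    (2 : Int) ^ ((PySem.List.pyRange 1 (i + 1) 1).foldl (fun l x => l ++ [x]) []).sum.toNat
      = (2 : Int) ^ (PySem.Int.floordiv (i * (i + 1)) 2).toNat := by
  obtain ⟨m, rfl⟩ := Int.eq_ofNat_of_zero_le hi
  have hlist : ((PySem.List.pyRange 1 ((m : Int) + 1) 1).foldl (fun l x => l ++ [x]) ([] : List Int))
      = PySem.List.pyRange 1 ((m : Int) + 1) 1 := by
    generalize PySem.List.pyRange 1 ((m : Int) + 1) 1 = xs
    induction xs using List.reverseRecOn with
    | nil => rfl
    | append_singleton ys y ih => simp [List.foldl_append, ih]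
  rw [hlist]
  have hs := pv_sum_one_to m
  have hfd : PySem.Int.floordiv ((m : Int) * ((m : Int) + 1)) 2
      = (PySem.List.pyRange 1 ((m : Int) + 1) 1).sum := by
    rw [PySem.Int.floordiv_eq_iff_of_pos (by omega)]
    constructor <;> nlinarith [hs]
  rw [hfd]

-- ===== VERDICT (by name: the statement is the Claim_ definition above) =====
theorem question_30_spec : Claim_equal_question_30 := by
  intro n _
  unfold Spec_question_30 question_30 question_30_alt
  rw [PySem.List.foldl_append_singleton_eq_map]
  apply List.map_congr_left
  intro i hi
  have h0 : 0 ≤ i := ((PySem.List.mem_pyRange_one).mp hi).1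
  exact pv_body i h0
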